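-- pv_equiv track=rewrite | github.com/EvgenYanukovich/Sem-6 | Python/lab2/zad7.py | find_product_numbers
-- ===== SOURCE A (Python) =====
-- def find_product_numbers(N):
--     """Находит все числа от 1 до N, являющиеся произведением двух чисел, меньших N"""
--     results = set()  # Используем множество для исключения дубликатов
--
--     # Внешний цикл для первого множителя
--     for i in range(1, N):
--         # Внутренний цикл для второго множителя
--         for j in range(i, N):  # Начинаем с i, чтобы избежать лишних проверок
--             product = i * j
--             if product <= N:
--                 results.add(product)
--             else:
--                 break  # Если произведение превысило N, переходим к следующему i
--
--     return sorted(list(results))  # Преобразуем в отсортированный список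
-- ===== SOURCE B (Python) =====
-- def find_product_numbers(N):
--     """All k in 1..N that equal i*j with 1<=i<=j<N and i*j<=N: that is 1..N-1,
--     plus N itself iff N has a divisor d with 2 <= d and d*d <= N (N composite)."""
--     res = list(range(1, N))
--     d = 2
--     while d * d <= N:
--         if N % d == 0:
--             res.append(N)
--             return res
--         d += 1
--     return res
-- ===== Notes on version B (the rewrite author's own statement) =====
-- stated objective: faster
-- what changed: Replaces the double loop over factor pairs plus set+sort with a direct construction: output 1..N-1 and append N exactly when trial division up to sqrt(N) finds a proper divisor.
import Mathlib
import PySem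

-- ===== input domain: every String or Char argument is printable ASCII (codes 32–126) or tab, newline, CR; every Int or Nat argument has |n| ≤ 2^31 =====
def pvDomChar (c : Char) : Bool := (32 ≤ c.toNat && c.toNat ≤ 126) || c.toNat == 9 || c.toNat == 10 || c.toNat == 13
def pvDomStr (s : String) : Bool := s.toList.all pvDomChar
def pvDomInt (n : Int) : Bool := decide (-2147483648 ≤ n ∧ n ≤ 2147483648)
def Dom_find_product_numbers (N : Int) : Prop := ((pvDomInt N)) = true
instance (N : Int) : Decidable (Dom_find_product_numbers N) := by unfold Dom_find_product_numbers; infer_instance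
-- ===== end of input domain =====

-- B replaces A's double loop over factor pairs (collected in a set, then sorted) by
-- directly emitting 1..N-1 and appending N iff trial division finds a proper divisor.
-- ===== PORT A =====
-- inner loop 'for j in range(i, N): … break' of A, with the break as an early return
def pvInnerA (N i : Int) : List Int → PySem.Set Int → PySem.Set Int
  | [], s => s
  | j :: rest, s =>
      if i * j ≤ N then pvInnerA N i rest (PySem.Set.add s (i * j)) else s

def find_product_numbers (N : Int) : List Int :=
  let results :=
    (PySem.List.pyRange 1 N 1).foldl
      (fun s i => pvInnerA N i (PySem.List.pyRange i N 1) s) PySem.Set.empty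
  PySem.List.sorted results (fun x => x) false

-- ===== PORT B =====
-- the 'while d * d <= N' trial-division loop of B (d starts at 2, so d : Nat is exact)
def pvTrialDiv (N : Int) (d : Nat) : Bool :=
  if (d : Int) * (d : Int) ≤ N then
    (if PySem.Int.mod N (d : Int) = 0 then true else pvTrialDiv N (d + 1))
  else false
termination_by (N + 1 - (d : Int) * (d : Int)).toNat
decreasing_by
  rename_i h hm
  have hd : (0 : Int) ≤ (d : Int) := Int.natCast_nonneg d
  have h2 : ((d : Int) + 1) * ((d : Int) + 1) = (d : Int) * (d : Int) + (2 * (d : Int) + 1) := by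
    ring
  push_cast
  rw [h2]
  generalize hx : (d : Int) * (d : Int) = x at h ⊢
  omega

def find_product_numbers_alt (N : Int) : List Int :=
  let res := PySem.List.pyRange 1 N 1
  if pvTrialDiv N 2 then res ++ [N] else res

-- ===== PRECONDITION & SPEC =====
def Spec_find_product_numbers (N : Int) (out : List Int) : Prop := out = find_product_numbers_alt N
instance (N : Int) (out : List Int) : Decidable (Spec_find_product_numbers N out) := by unfold Spec_find_product_numbers; infer_instance

-- ===== CLAIM (what is proved, stated in full; the proofs are below) =====
def Claim_equal_find_product_numbers : Prop := ∀ (N : Int), Dom_find_product_numbers N → Spec_find_product_numbers N (find_product_numbers N)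

-- ===== LEMMAS AND PROOFS =====

-- pvTrialDiv N d decides the existence of a divisor i ≥ d with i*i ≤ N
lemma pvTrialDiv_iff (N : Int) (d : Nat) :
    pvTrialDiv N d = true ↔ ∃ i : Int, (d : Int) ≤ i ∧ i * i ≤ N ∧ i ∣ N := by
  fun_induction pvTrialDiv N d with
  | case1 d hle hmod =>
      simp only [true_iff]
      exact ⟨(d : Int), le_refl _, hle, (PySem.Int.mod_eq_zero_iff_dvd N d).mp hmod⟩
  | case2 d hle hmod ih =>
      rw [ih]
      constructor
      · rintro ⟨i, hdi, hii, hdvd⟩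
        exact ⟨i, by push_cast at hdi ⊢; omega, hii, hdvd⟩
      · rintro ⟨i, hdi, hii, hdvd⟩
        refine ⟨i, ?_, hii, hdvd⟩
        push_cast
        rcases eq_or_lt_of_le hdi with h | h
        · exact absurd ((PySem.Int.mod_eq_zero_iff_dvd N d).mpr (h ▸ hdvd)) hmod
        · omega
  | case3 d hle =>
      simp only [Bool.false_eq_true, false_iff]
      rintro ⟨i, hdi, hii, -⟩
      have hd : (0 : Int) ≤ (d : Int) := Int.natCast_nonneg d
      nlinarith

-- A's inner loop when every product is taken (the i = 1 pass)
lemma pvInnerA_all (N i : Int) (js : List Int) (s : PySem.Set Int)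
    (h : ∀ j ∈ js, i * j ≤ N) :
    pvInnerA N i js s = js.foldl (fun s j => PySem.Set.add s (i * j)) s := by
  induction js generalizing s with
  | nil => rfl
  | cons j rest ih =>
      simp only [pvInnerA, List.foldl_cons, if_pos (h j (List.mem_cons_self))]
      exact ih _ (fun j' hj' => h j' (List.mem_cons_of_mem _ hj'))

-- A's inner loop for i ≥ 2 over a set already containing 1..N-1: it can only add N
lemma pvInnerA_ge_two (N i : Int) (hN : 2 ≤ N) (hi : 2 ≤ i) :
    ∀ (k : Nat) (j₀ : Int), (N - j₀).toNat = k → i ≤ j₀ →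
    ∀ (s : PySem.Set Int), (∀ x : Int, 1 ≤ x → x < N → x ∈ s) →
    ((∃ j : Int, j₀ ≤ j ∧ i * j = N) ∧
        pvInnerA N i (PySem.List.pyRange j₀ N 1) s = PySem.Set.add s N) ∨
    (¬ (∃ j : Int, j₀ ≤ j ∧ i * j = N) ∧
        pvInnerA N i (PySem.List.pyRange j₀ N 1) s = s) := by
  intro k
  induction k using Nat.strong_induction_on with
  | _ k ih =>
    intro j₀ hk hij s hmem
    by_cases hb : N ≤ j₀
    · right
      rw [PySem.List.pyRange_one_eq_nil hb]
      refine ⟨?_, rfl⟩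
      rintro ⟨j, hj, he⟩
      nlinarith
    · push_neg at hb
      rw [PySem.List.pyRange_one_cons hb]
      simp only [pvInnerA]
      by_cases hle : i * j₀ ≤ N
      · rw [if_pos hle]
        by_cases heq : i * j₀ = N
        · -- N is added now; the rest of the loop is a no-op
          left
          refine ⟨⟨j₀, le_refl _, heq⟩, ?_⟩
          rw [heq]
          rcases ih (N - (j₀ + 1)).toNat (by omega) (j₀ + 1) rfl (by omega)
              (PySem.Set.add s N)
              (fun x h1 h2 => (PySem.Set.mem_add _ _ _).mpr (Or.inl (hmem x h1 h2))) with
            ⟨⟨j, hj, he⟩, _⟩ | ⟨_, hres⟩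
          · nlinarith
          · exact hres
        · -- product < N, already present: add is a no-op
          have hlt : i * j₀ < N := lt_of_le_of_ne hle heq
          have hpos : (1 : Int) ≤ i * j₀ := by nlinarith
          rw [PySem.Set.add_of_mem (hmem _ hpos hlt)]
          rcases ih (N - (j₀ + 1)).toNat (by omega) (j₀ + 1) rfl (by omega) s hmem with
            ⟨⟨j, hj, he⟩, hres⟩ | ⟨hne, hres⟩
          · exact Or.inl ⟨⟨j, by omega, he⟩, hres⟩
          · refine Or.inr ⟨?_, hres⟩
            rintro ⟨j, hj, he⟩
            rcases eq_or_lt_of_le hj with h | h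
            · exact heq (h ▸ he)
            · exact hne ⟨j, by omega, he⟩
      · rw [if_neg hle]
        refine Or.inr ⟨?_, rfl⟩
        rintro ⟨j, hj, he⟩
        push_neg at hle
        nlinarith

-- the inner-loop hit condition, as a divisor condition on i
lemma pvCond_iff (N i : Int) (hi : 2 ≤ i) :
    (∃ j : Int, i ≤ j ∧ i * j = N) ↔ i * i ≤ N ∧ i ∣ N := by
  constructor
  · rintro ⟨j, hj, he⟩
    exact ⟨by nlinarith, ⟨j, he.symm⟩⟩
  · rintro ⟨hii, ⟨k, hk⟩⟩
    refine ⟨k, ?_, hk.symm⟩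
    have : i * i ≤ i * k := by rw [← hk]; exact hii
    exact le_of_mul_le_mul_left this (by omega)

-- A's outer loop from i₀ ≥ 2: it adds N iff N has a divisor i ≥ i₀ with i*i ≤ N
lemma pvOuter_ge_two (N : Int) (hN : 2 ≤ N) :
    ∀ (k : Nat) (i₀ : Int), (N - i₀).toNat = k → 2 ≤ i₀ →
    ∀ (s : PySem.Set Int), (∀ x : Int, 1 ≤ x → x < N → x ∈ s) →
    ((∃ i : Int, i₀ ≤ i ∧ i * i ≤ N ∧ i ∣ N) ∧
        (PySem.List.pyRange i₀ N 1).foldl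
          (fun s i => pvInnerA N i (PySem.List.pyRange i N 1) s) s = PySem.Set.add s N) ∨
    (¬ (∃ i : Int, i₀ ≤ i ∧ i * i ≤ N ∧ i ∣ N) ∧
        (PySem.List.pyRange i₀ N 1).foldl
          (fun s i => pvInnerA N i (PySem.List.pyRange i N 1) s) s = s) := by
  intro k
  induction k using Nat.strong_induction_on with
  | _ k ih =>
    intro i₀ hk hi₀ s hmem
    by_cases hb : N ≤ i₀
    · right
      rw [PySem.List.pyRange_one_eq_nil hb]
      refine ⟨?_, rfl⟩
      rintro ⟨i, hi, hii, -⟩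
      nlinarith
    · push_neg at hb
      rw [PySem.List.pyRange_one_cons hb, List.foldl_cons]
      rcases pvInnerA_ge_two N i₀ hN hi₀ (N - i₀).toNat i₀ rfl (le_refl _) s hmem with
        ⟨hex, hres⟩ | ⟨hnex, hres⟩
      · -- i₀ is a hit: s becomes add s N, which stays fixed afterwards
        rw [hres]
        have hN_mem : N ∈ PySem.Set.add s N := (PySem.Set.mem_add _ _ _).mpr (Or.inr rfl)
        have hmem' : ∀ x : Int, 1 ≤ x → x < N → x ∈ PySem.Set.add s N :=
          fun x h1 h2 => (PySem.Set.mem_add _ _ _).mpr (Or.inl (hmem x h1 h2))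
        have hcond := (pvCond_iff N i₀ hi₀).mp hex
        rcases ih (N - (i₀ + 1)).toNat (by omega) (i₀ + 1) rfl (by omega)
            (PySem.Set.add s N) hmem' with ⟨_, hres2⟩ | ⟨_, hres2⟩
        · rw [hres2, PySem.Set.add_of_mem hN_mem]
          exact Or.inl ⟨⟨i₀, le_refl _, hcond.1, hcond.2⟩, rfl⟩
        · rw [hres2]
          exact Or.inl ⟨⟨i₀, le_refl _, hcond.1, hcond.2⟩, rfl⟩
      · -- i₀ is no hit: s unchanged
        rw [hres]
        rcases ih (N - (i₀ + 1)).toNat (by omega) (i₀ + 1) rfl (by omega) s hmem with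
          ⟨⟨i, hi, hii, hdvd⟩, hres2⟩ | ⟨hnex2, hres2⟩
        · exact Or.inl ⟨⟨i, by omega, hii, hdvd⟩, hres2⟩
        · refine Or.inr ⟨?_, hres2⟩
          rintro ⟨i, hi, hii, hdvd⟩
          rcases eq_or_lt_of_le hi with h | h
          · exact hnex ((pvCond_iff N i₀ hi₀).mpr ⟨h ▸ hii, h ▸ hdvd⟩)
          · exact hnex2 ⟨i, by omega, hii, hdvd⟩

-- the trial-division start at d = 2, restated over Int
lemma pvTrialDiv_two_iff (N : Int) :
    pvTrialDiv N 2 = true ↔ ∃ i : Int, 2 ≤ i ∧ i * i ≤ N ∧ i ∣ N := by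
  have := pvTrialDiv_iff N 2
  push_cast at this
  exact this

-- the i = 1 pass fills the set with exactly 1..N-1
lemma pvFirstPass (N : Int) :
    pvInnerA N 1 (PySem.List.pyRange 1 N 1) PySem.Set.empty = PySem.List.pyRange 1 N 1 := by
  rw [pvInnerA_all N 1 _ _ (fun j hj => by
    rw [PySem.List.mem_pyRange_one] at hj; omega)]
  simp only [one_mul]
  have h : (PySem.List.pyRange 1 N 1).foldl (fun s j => PySem.Set.add s j) PySem.Set.empty
      = PySem.Set.ofList (PySem.List.pyRange 1 N 1) := rfl
  rw [h]
  exact PySem.Set.ofList_eq_self_of_nodup _ (PySem.List.nodup_pyRange_one 1 N)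

-- ===== VERDICT (by name: the statement is the Claim_ definition above) =====
theorem find_product_numbers_spec : Claim_equal_find_product_numbers := by
  intro N _
  unfold Spec_find_product_numbers find_product_numbers find_product_numbers_alt
  by_cases hN : 2 ≤ N
  · -- N ≥ 2: the outer loop is 1 :: range(2, N); the i = 1 pass fills in 1..N-1
    have h1N : (1 : Int) < N := by omega
    have hsplit : (PySem.List.pyRange 1 N 1).foldl
        (fun s i => pvInnerA N i (PySem.List.pyRange i N 1) s) PySem.Set.empty
        = (PySem.List.pyRange 2 N 1).foldl
            (fun s i => pvInnerA N i (PySem.List.pyRange i N 1) s)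
            (PySem.List.pyRange 1 N 1) := by
      conv_lhs => rw [PySem.List.pyRange_one_cons h1N]
      rw [List.foldl_cons, pvFirstPass N]
      norm_num
    rw [hsplit]
    have hmem : ∀ x : Int, 1 ≤ x → x < N → x ∈ PySem.List.pyRange 1 N 1 :=
      fun x h1 h2 => (PySem.List.mem_pyRange_one).mpr ⟨h1, h2⟩
    have hNnotmem : N ∉ PySem.List.pyRange 1 N 1 := by
      simp [PySem.List.mem_pyRange_one]
    rcases pvOuter_ge_two N hN (N - 2).toNat 2 rfl (le_refl _)
        (PySem.List.pyRange 1 N 1) hmem with ⟨hex, hres⟩ | ⟨hnex, hres⟩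
    · rw [hres, PySem.Set.add_of_not_mem hNnotmem,
        if_pos ((pvTrialDiv_two_iff N).mpr hex)]
      refine PySem.List.sorted_eq_of_perm_of_pairwise_lt _ _ _ (List.Perm.refl _) ?_
      refine (List.pairwise_append).mpr ⟨PySem.List.pairwise_lt_pyRange_one 1 N, ?_, ?_⟩
      · exact List.pairwise_singleton _ _
      · intro x hx y hy
        rw [List.mem_singleton] at hy
        rw [PySem.List.mem_pyRange_one] at hx
        omega
    · rw [hres]
      have ht : pvTrialDiv N 2 ≠ true := fun h => hnex ((pvTrialDiv_two_iff N).mp h)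
      rw [if_neg ht]
      exact PySem.List.sorted_eq_of_perm_of_pairwise_lt _ _ _ (List.Perm.refl _)
        (PySem.List.pairwise_lt_pyRange_one 1 N)
  · -- N ≤ 1: both sides are []
    push_neg at hN
    have hr : PySem.List.pyRange 1 N 1 = [] := PySem.List.pyRange_one_eq_nil (by omega)
    rw [hr]
    have ht : pvTrialDiv N 2 ≠ true := by
      rw [pvTrialDiv]
      have h4 : ¬ (((2 : Nat) : Int) * ((2 : Nat) : Int) ≤ N) := by push_cast; omega
      rw [if_neg h4]
      simp
    rw [if_neg ht]
    rfl
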